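-- pv_equiv track=rewrite | github.com/Debasish-Mahapatra/alaro-analysis | alaro_analysis/converter/config.py | parse_vars_tokens
-- ===== SOURCE A (Python) =====
-- def unique_preserve(items: list[str] | tuple[str, ...]) -> list[str]:
--     seen: set[str] = set()
--     out: list[str] = []
--     for item in items:
--         if item in seen:
--             continue
--         seen.add(item)
--         out.append(item)
--     return out
--
-- def parse_vars_tokens(tokens: list[str] | tuple[str, ...]) -> list[str]:
--     out: list[str] = []
--     for token in tokens:
--         for part in token.split(","):
--             item = part.strip()
--             if item:
--                 out.append(item)
--     return unique_preserve(out)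
-- ===== SOURCE B (Python) =====
-- def parse_vars_tokens(tokens):
--     # Single-pass character-level state machine: no split(), no strip(), no
--     # intermediate duplicate-bearing list.  buf holds the current item with
--     # leading whitespace dropped; pend holds a run of whitespace that is
--     # dropped if trailing, merged into buf otherwise.  Items are emitted
--     # (deduplicated on the fly) at each comma and at token end.
--     seen = set()
--     out = []
--     for token in tokens:
--         buf = []
--         pend = []
--         for ch in token:
--             if ch == ",":
--                 if buf:
--                     item = "".join(buf)
--                     if item not in seen:
--                         seen.add(item)
--                         out.append(item)
--                 buf = []
--                 pend = []
--             elif ch.isspace():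
--                 if buf:
--                     pend.append(ch)
--             else:
--                 buf += pend
--                 buf.append(ch)
--                 pend = []
--         if buf:
--             item = "".join(buf)
--             if item not in seen:
--                 seen.add(item)
--                 out.append(item)
--     return out
-- ===== Notes on version B (the rewrite author's own statement) =====
-- stated objective: alternative
-- what changed: B replaces A's split/strip pipeline plus a separate dedup pass over an intermediate duplicate-bearing list by a single-pass character-level state machine (item buffer + pending-whitespace run) that never calls split or strip and emits deduplicated items on the fly.
import Mathlib
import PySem

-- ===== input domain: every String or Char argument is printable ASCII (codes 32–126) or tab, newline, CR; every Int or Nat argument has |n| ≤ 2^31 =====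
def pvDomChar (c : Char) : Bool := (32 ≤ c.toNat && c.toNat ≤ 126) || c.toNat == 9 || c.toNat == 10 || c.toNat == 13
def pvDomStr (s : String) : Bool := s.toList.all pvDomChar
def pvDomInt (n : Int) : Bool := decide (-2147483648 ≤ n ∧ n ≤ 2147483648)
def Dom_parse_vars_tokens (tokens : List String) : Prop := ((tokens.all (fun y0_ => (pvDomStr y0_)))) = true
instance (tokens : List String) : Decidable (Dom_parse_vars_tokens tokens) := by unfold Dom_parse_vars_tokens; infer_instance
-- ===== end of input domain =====

-- B replaces A's split/strip pipeline + seen-set dedup helper by a single-pass character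
-- state machine (buffer + pending-whitespace run) deduplicating against the output list itself;
-- same return value, alternative algorithm.

-- ===== PORT A =====
-- helper of A: dedup keeping first occurrences, via a seen-set and an out-list
def unique_preserve (items : List String) : List String :=
  (items.foldl
    (fun (st : PySem.Set String × List String) item =>
      if st.1.contains item then st
      else (st.1.add item, st.2 ++ [item]))
    ((PySem.Set.empty : PySem.Set String), ([] : List String))).2

-- token.split(",") is ported as (split? token ",").getD []: the sep is the non-empty literal ",",
-- so split? is always `some` and getD never takes the default.
def parse_vars_tokens (tokens : List String) : List String :=
  unique_preserve
    (tokens.foldl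
      (fun out token =>
        ((PySem.Str.split? token ",").getD []).foldl
          (fun out part =>
            let item := PySem.Str.strip part
            if item != "" then out ++ [item] else out)
          out)
      [])

-- ===== PORT B =====
-- flush at a comma / at token end: `if buf: item = "".join(buf); if item not in seen: ...`
def pvFlushP (buf : List Char) (st : PySem.Set String × List String) :
    PySem.Set String × List String :=
  if buf ≠ [] then
    let item := String.ofList buf
    if ¬ st.1.contains item then (st.1.add item, st.2 ++ [item]) else st
  else st

-- the inner character loop of B: buf = current item (leading whitespace dropped),
-- pend = pending run of whitespace (dropped if trailing, merged into buf otherwise)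
def pvScanP : List Char → List Char → List Char → PySem.Set String × List String →
    PySem.Set String × List String
  | [], buf, _, st => pvFlushP buf st
  | c :: rest, buf, pend, st =>
    if c = ',' then pvScanP rest [] [] (pvFlushP buf st)
    else if PySem.Chars.isspace c then
      pvScanP rest buf (if buf ≠ [] then pend ++ [c] else pend) st
    else pvScanP rest (buf ++ pend ++ [c]) [] st

def parse_vars_tokens_alt (tokens : List String) : List String :=
  (tokens.foldl (fun st token => pvScanP token.toList [] [] st)
    ((PySem.Set.empty : PySem.Set String), ([] : List String))).2

-- ===== PRECONDITION & SPEC =====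
def Spec_parse_vars_tokens (tokens : List String) (out : List String) : Prop := out = parse_vars_tokens_alt tokens
instance (tokens : List String) (out : List String) : Decidable (Spec_parse_vars_tokens tokens out) := by unfold Spec_parse_vars_tokens; infer_instance

-- ===== CLAIM (what is proved, stated in full; the proofs are below) =====
def Claim_equal_parse_vars_tokens : Prop := ∀ (tokens : List String), Dom_parse_vars_tokens tokens → Spec_parse_vars_tokens tokens (parse_vars_tokens tokens)

-- ===== LEMMAS AND PROOFS =====

-- one-list version of B's scanner (proof device: B's seen set always equals its out list)
def pvFlush (buf : List Char) (out : List String) : List String :=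
  if buf ≠ [] ∧ ¬ out.contains (String.ofList buf) then out ++ [String.ofList buf] else out

def pvScan : List Char → List Char → List Char → List String → List String
  | [], buf, _, out => pvFlush buf out
  | c :: rest, buf, pend, out =>
    if c = ',' then pvScan rest [] [] (pvFlush buf out)
    else if PySem.Chars.isspace c then
      pvScan rest buf (if buf ≠ [] then pend ++ [c] else pend) out
    else pvScan rest (buf ++ pend ++ [c]) [] out

theorem flush_diag (buf : List Char) (s : List String) :
    pvFlushP buf (s, s) = (pvFlush buf s, pvFlush buf s) := by
  by_cases hb : buf = []
  · simp [pvFlushP, pvFlush, hb]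
  · by_cases hc : String.ofList buf ∈ s
    · simp [pvFlushP, pvFlush, hb, hc]
    · simp [pvFlushP, pvFlush, hb, hc, PySem.Set.add, PySem.Set.contains]

theorem scan_diag (cs : List Char) : ∀ (buf pend : List Char) (s : List String),
    pvScanP cs buf pend (s, s) = (pvScan cs buf pend s, pvScan cs buf pend s) := by
  induction cs with
  | nil => intro buf pend s; simp [pvScanP, pvScan, flush_diag]
  | cons c rest ih =>
    intro buf pend s
    simp only [pvScanP, pvScan]
    by_cases hc : c = ','
    · simp [hc, flush_diag, ih]
    · by_cases hs : PySem.Chars.isspace c <;> simp [hc, hs, ih]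

theorem alt_eq_scan (tokens : List String) :
    parse_vars_tokens_alt tokens
      = tokens.foldl (fun out token => pvScan token.toList [] [] out) [] := by
  unfold parse_vars_tokens_alt
  have main : ∀ (ts : List String) (s : List String),
      ts.foldl (fun st token => pvScanP token.toList [] [] st) (s, s)
        = (ts.foldl (fun out token => pvScan token.toList [] [] out) s,
           ts.foldl (fun out token => pvScan token.toList [] [] out) s) := by
    intro ts
    induction ts with
    | nil => intro s; rfl
    | cons t ts ih => intro s; simp only [List.foldl_cons, scan_diag, ih]
  rw [show ((PySem.Set.empty : PySem.Set String), ([] : List String))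
      = (([] : List String), ([] : List String)) from rfl, main]


-- reference single-char split on ',' (structural recursion, used only in the proofs)
def mySplit : List Char → List (List Char)
  | [] => [[]]
  | c :: rest => if c = ',' then [] :: mySplit rest else (mySplit rest).modifyHead (c :: ·)

theorem mySplit_ne_nil (cs : List Char) : mySplit cs ≠ [] := by
  cases cs with
  | nil => simp [mySplit]
  | cons c rest =>
    simp only [mySplit]
    split
    · simp
    · exact fun h => mySplit_ne_nil rest (by
        cases hm : mySplit rest with
        | nil => rfl
        | cons x xs => rw [hm] at h; simp [List.modifyHead] at h)

theorem splitOn_go_comma (cs : List Char) : ∀ (fuel : Nat) (cur : List Char) (acc : List (List Char)),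
    cs.length < fuel →
    PySem.Chars.splitOn.go [','] fuel cs cur acc
      = acc.reverse ++ (mySplit cs).modifyHead (cur.reverse ++ ·) := by
  induction cs with
  | nil =>
    intro fuel cur acc hf
    match fuel with
    | f + 1 => rw [PySem.Chars.splitOn.go.eq_def]; simp [mySplit, List.modifyHead]
  | cons c rest ih =>
    intro fuel cur acc hf
    match fuel, hf with
    | f + 1, hf =>
      rw [PySem.Chars.splitOn.go.eq_def]
      simp only []
      by_cases hc : c = ','
      · subst hc
        have hpre : ([','] : List Char).isPrefixOf (',' :: rest) = true := by
          simp [List.isPrefixOf]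
        rw [if_pos hpre]
        simp only [List.length_cons, List.length_nil, List.drop_succ_cons, List.drop_zero]
        rw [ih f [] (cur.reverse :: acc) (by simpa using Nat.lt_of_succ_lt_succ hf)]
        simp [mySplit, List.modifyHead]
        cases mySplit rest <;> rfl
      · have hpre : ([','] : List Char).isPrefixOf (c :: rest) = false := by
          simp [List.isPrefixOf]; exact fun h => hc h.symm
        rw [if_neg (by simp [hpre])]
        rw [ih f (c :: cur) acc (by simpa using Nat.lt_of_succ_lt_succ hf)]
        simp only [mySplit, if_neg hc]
        cases hm : mySplit rest with
        | nil => exact absurd hm (mySplit_ne_nil rest)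
        | cons x xs => simp [List.modifyHead]

theorem splitOn_comma (cs : List Char) : PySem.Chars.splitOn cs [','] = mySplit cs := by
  unfold PySem.Chars.splitOn
  rw [splitOn_go_comma cs (cs.length + 1) [] [] (Nat.lt_succ_self _)]
  cases hm : mySplit cs with
  | nil => exact absurd hm (mySplit_ne_nil cs)
  | cons x xs => simp [List.modifyHead]

theorem strSplit_comma (s : String) :
    (PySem.Str.split? s ",").getD [] = (mySplit s.toList).map String.ofList := by
  have h := PySem.Str.split?_map s ","
  have hs : PySem.Chars.split? s.toList (",".toList) = some (mySplit s.toList) := by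
    simp [PySem.Chars.split?, splitOn_comma]
  rw [hs] at h
  cases hsp : PySem.Str.split? s "," with
  | none => rw [hsp] at h; simp at h
  | some parts =>
    rw [hsp] at h
    simp only [Option.map_some, Option.some.injEq] at h
    simp only [Option.getD_some, ← h, List.map_map]
    simp [Function.comp_def, String.ofList_toList]

-- head/tail form of mySplit (total, avoids head!/tail on a nonempty list)
def mySplitP : List Char → List Char × List (List Char)
  | [] => ([], [])
  | c :: rest =>
    let p := mySplitP rest
    if c = ',' then ([], p.1 :: p.2) else (c :: p.1, p.2)

theorem mySplit_eq_P (cs : List Char) : mySplit cs = (mySplitP cs).1 :: (mySplitP cs).2 := by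
  induction cs with
  | nil => rfl
  | cons c rest ih =>
    simp only [mySplit, mySplitP]
    by_cases hc : c = ','
    · simp [hc, ih]
    · simp [hc, ih, List.modifyHead]

-- the item built by B's character steps from a comma-free stream (same step as pvScan)
def gstrip : List Char → List Char → List Char → List Char
  | buf, _, [] => buf
  | buf, pend, c :: r =>
    if PySem.Chars.isspace c then gstrip buf (if buf ≠ [] then pend ++ [c] else pend) r
    else gstrip (buf ++ pend ++ [c]) [] r

-- L1: the scanner processes exactly the comma-separated parts, flushing each finished item
theorem scan_split (cs : List Char) : ∀ (buf pend : List Char) (out : List String),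
    pvScan cs buf pend out
      = ((mySplitP cs).2).foldl (fun o p => pvFlush (gstrip [] [] p) o)
          (pvFlush (gstrip buf pend (mySplitP cs).1) out) := by
  induction cs with
  | nil => intro buf pend out; simp [pvScan, mySplitP, gstrip]
  | cons c rest ih =>
    intro buf pend out
    simp only [pvScan, mySplitP]
    by_cases hc : c = ','
    · simp only [if_pos hc, ih]
      simp [gstrip, List.foldl_cons]
    · by_cases hs : PySem.Chars.isspace c
      · simp only [if_neg hc, if_pos hs, ih]
        simp [gstrip, hs]
      · simp only [if_neg hc, if_neg hs, ih]
        simp [gstrip, hs]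

theorem dropWhile_mid_nonspace (c : Char) (hc : PySem.Chars.isspace c = false)
    (l m : List Char) :
    List.dropWhile PySem.Chars.isspace (l ++ c :: m)
      = List.dropWhile PySem.Chars.isspace l ++ c :: m := by
  induction l with
  | nil => simp [hc]
  | cons x xs ih =>
    by_cases hx : PySem.Chars.isspace x
    · simp [hx, ih]
    · simp [hx]

-- once past leading whitespace, the scanner builds buf ++ rstrip(pend ++ rest)
theorem gstrip_rstrip (p : List Char) : ∀ (buf pend : List Char), buf ≠ [] →
    pend.all PySem.Chars.isspace →
    gstrip buf pend p = buf ++ PySem.Chars.rstrip (pend ++ p) := by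
  induction p with
  | nil =>
    intro buf pend hb hp
    have : List.dropWhile PySem.Chars.isspace pend.reverse = [] := by
      apply List.dropWhile_eq_nil_iff.mpr
      intro x hx
      exact (List.all_eq_true.mp hp x (List.mem_reverse.mp hx))
    simp [gstrip, PySem.Chars.rstrip, this]
  | cons c r ih =>
    intro buf pend hb hp
    by_cases hs : PySem.Chars.isspace c
    · simp only [gstrip, if_pos hs, if_pos hb]
      rw [ih buf (pend ++ [c]) hb (by simp_all)]
      simp
    · simp only [gstrip, if_neg hs]
      rw [ih (buf ++ pend ++ [c]) [] (by simp [hb]) rfl]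
      have : PySem.Chars.rstrip (pend ++ c :: r) = pend ++ c :: PySem.Chars.rstrip r := by
        simp only [PySem.Chars.rstrip, List.reverse_append, List.reverse_cons]
        rw [show r.reverse ++ [c] ++ pend.reverse = r.reverse ++ c :: pend.reverse by simp]
        rw [dropWhile_mid_nonspace c (by simpa using hs)]
        simp
      rw [this]
      simp

-- L2: from the empty state, the scanner computes exactly Python's strip
theorem gstrip_eq_strip (p : List Char) : gstrip [] [] p = PySem.Chars.strip p := by
  induction p with
  | nil => rfl
  | cons c r ih =>
    by_cases hs : PySem.Chars.isspace c
    · rw [show gstrip [] [] (c :: r) = gstrip [] [] r by simp [gstrip, hs]]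
      rw [ih]
      simp [PySem.Chars.strip, PySem.Chars.lstrip, hs]
    · simp only [gstrip, if_neg hs, List.nil_append]
      rw [gstrip_rstrip r [c] [] (by simp) rfl]
      simp only [List.nil_append]
      simp only [PySem.Chars.strip, PySem.Chars.lstrip, List.dropWhile_cons, hs,
        Bool.false_eq_true, if_false]
      have : PySem.Chars.rstrip (c :: r) = c :: PySem.Chars.rstrip r := by
        simp only [PySem.Chars.rstrip, List.reverse_cons]
        rw [show r.reverse ++ [c] = r.reverse ++ c :: [] by simp]
        rw [dropWhile_mid_nonspace c (by simpa using hs)]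
        simp
      simp [this]

-- A's dedup helper: its seen set and its out list are the same list at every step
theorem up_loop (xs : List String) : ∀ (s : PySem.Set String),
    xs.foldl
      (fun (st : PySem.Set String × List String) item =>
        if st.1.contains item then st
        else (st.1.add item, st.2 ++ [item]))
      (s, s)
      = (xs.foldl PySem.Set.add s, xs.foldl PySem.Set.add s) := by
  induction xs with
  | nil => intro s; rfl
  | cons x xs ih =>
    intro s
    simp only [List.foldl_cons]
    by_cases hc : s.contains x
    · rw [if_pos hc]
      have : PySem.Set.add s x = s := by rw [PySem.Set.add, if_pos hc]
      rw [this]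
      exact ih s
    · rw [if_neg hc]
      have : PySem.Set.add s x = s ++ [x] := by rw [PySem.Set.add, if_neg hc]
      rw [this]
      exact ih (s ++ [x])

theorem unique_preserve_eq_fold (xs : List String) :
    unique_preserve xs = xs.foldl PySem.Set.add [] := by
  unfold unique_preserve
  rw [show ((PySem.Set.empty : PySem.Set String), ([] : List String))
      = ((PySem.Set.empty : PySem.Set String), (PySem.Set.empty : PySem.Set String)) from rfl]
  rw [up_loop]
  rfl

-- A's builder loop, flattened
theorem builder_eq (tokens : List String) :
    tokens.foldl
      (fun out token =>
        ((PySem.Str.split? token ",").getD []).foldl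
          (fun out part =>
            let item := PySem.Str.strip part
            if item != "" then out ++ [item] else out)
          out)
      []
      = tokens.flatMap (fun token =>
          (((PySem.Str.split? token ",").getD []).map PySem.Str.strip).filter (fun item => item != "")) := by
  have hin : ∀ (parts out : List String),
      parts.foldl
        (fun out part =>
          let item := PySem.Str.strip part
          if item != "" then out ++ [item] else out)
        out
        = out ++ (parts.map PySem.Str.strip).filter (fun item => item != "") := by
    intro parts out
    rw [List.filter_map]
    exact PySem.List.foldl_append_if (fun part => PySem.Str.strip part != "") PySem.Str.strip parts out
  calc tokens.foldl _ [] = tokens.foldl (fun out token => out ++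
        (((PySem.Str.split? token ",").getD []).map PySem.Str.strip).filter (fun item => item != "")) [] := by
        exact PySem.List.foldl_congr_mem tokens _ _ [] (fun out token _ => hin _ out)
    _ = _ := by
        rw [PySem.List.foldl_append_eq_flatMap]; rfl

-- pvFlush is "add to the set unless the item is empty"
theorem pvFlush_eq_add (b : List Char) (o : List String) :
    pvFlush (PySem.Chars.strip b) o
      = if PySem.Str.strip (String.ofList b) != "" then PySem.Set.add o (PySem.Str.strip (String.ofList b)) else o := by
  have hstr : PySem.Str.strip (String.ofList b) = String.ofList (PySem.Chars.strip b) := by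
    simp [PySem.Str.strip, String.toList_ofList]
  rw [hstr]
  by_cases hb : PySem.Chars.strip b = []
  · simp [pvFlush, hb]
  · have hne : (String.ofList (PySem.Chars.strip b)) ≠ "" := by
      intro h
      have := congrArg String.toList h
      simp [String.toList_ofList] at this
      exact hb this
    simp only [pvFlush, PySem.Set.add, PySem.Set.contains, bne, ne_eq, hb,
      not_false_eq_true, true_and]
    by_cases hc : o.contains (String.ofList (PySem.Chars.strip b)) <;> simp [hc, hne, hb]

-- one token of B = folding Set.add over that token's stripped non-empty parts
theorem scan_token (t : String) (out : List String) :
    pvScan t.toList [] [] out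
      = ((((PySem.Str.split? t ",").getD []).map PySem.Str.strip).filter (fun item => item != "")).foldl
          PySem.Set.add out := by
  rw [scan_split, strSplit_comma, mySplit_eq_P t.toList]
  simp only [List.map_cons, List.filter_cons, List.map_map]
  have step : ∀ (p : List Char) (o : List String),
      pvFlush (gstrip [] [] p) o
        = if PySem.Str.strip (String.ofList p) != "" then PySem.Set.add o (PySem.Str.strip (String.ofList p)) else o := by
    intro p o
    rw [gstrip_eq_strip, pvFlush_eq_add]
  rw [step]
  have tailEq : ∀ (ps : List (List Char)) (o : List String),
      ps.foldl (fun o p => pvFlush (gstrip [] [] p) o) o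
        = (((ps.map (PySem.Str.strip ∘ String.ofList))).filter (fun item => item != "")).foldl PySem.Set.add o := by
    intro ps
    induction ps with
    | nil => intro o; rfl
    | cons p ps ih =>
      intro o
      simp only [List.foldl_cons, List.map_cons, List.filter_cons, Function.comp_apply]
      rw [step]
      by_cases h : PySem.Str.strip (String.ofList p) != "" <;> simp [h, ih]
  rw [tailEq]
  by_cases h : PySem.Str.strip (String.ofList (mySplitP t.toList).1) != "" <;>
    simp [h, Function.comp_def]

-- ===== VERDICT (by name: the statement is the Claim_ definition above) =====
theorem parse_vars_tokens_spec : Claim_equal_parse_vars_tokens := by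
  intro tokens hdom
  show parse_vars_tokens tokens = parse_vars_tokens_alt tokens
  clear hdom
  unfold parse_vars_tokens
  rw [builder_eq, unique_preserve_eq_fold, alt_eq_scan]
  induction tokens using List.reverseRecOn with
  | nil => rfl
  | append_singleton ts t ih =>
    simp only [List.flatMap_append, List.foldl_append, List.flatMap_cons, List.flatMap_nil,
      List.append_nil, List.foldl_cons, List.foldl_nil]
    rw [ih, scan_token]
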